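-- pv_equiv track=rewrite | github.com/gitKnowsMe/PersonalAIAgent_backend | monorepo/Personal AI Agent/backend/app/services/email/email_classifier.py | get_category_priority
-- ===== SOURCE A (Python) =====
-- from typing import List, Dict, Optional
--
-- def get_category_priority(tags: List[str]) -> int:
--     """
--     Get priority score for email categories.
--     Higher score = higher priority for search ranking.
--     """
--     priority_map = {
--         'security': 10,
--         'job_offer': 9,
--         'financial': 8,
--         'receipt': 7,
--         'work': 6,
--         'travel': 5,
--         'personal': 4,
--         'newsletter': 2,
--         'promotional': 1,
--         'general': 3
--     }
--
--     max_priority = 0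
--     for tag in tags:
--         if tag in priority_map:
--             max_priority = max(max_priority, priority_map[tag])
--
--     return max_priority
-- ===== SOURCE B (Python) =====
-- _PRIORITY_DESC = [
--     ('security', 10),
--     ('job_offer', 9),
--     ('financial', 8),
--     ('receipt', 7),
--     ('work', 6),
--     ('travel', 5),
--     ('personal', 4),
--     ('general', 3),
--     ('newsletter', 2),
--     ('promotional', 1),
-- ]
--
-- def get_category_priority(tags):
--     """Scan the fixed priority table in descending order and return the
--     priority of the first category present among the tags; 0 if none."""
--     present = set(tags)
--     for name, score in _PRIORITY_DESC:
--         if name in present: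
--             return score
--     return 0
-- ===== Notes on version B (the rewrite author's own statement) =====
-- stated objective: alternative
-- what changed: Instead of scanning the tags and tracking a running max of looked-up priorities, B builds a membership set of the tags once and scans the fixed priority table in descending priority order, returning the first category's score that is present (short-circuit), 0 if none.
import Mathlib
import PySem

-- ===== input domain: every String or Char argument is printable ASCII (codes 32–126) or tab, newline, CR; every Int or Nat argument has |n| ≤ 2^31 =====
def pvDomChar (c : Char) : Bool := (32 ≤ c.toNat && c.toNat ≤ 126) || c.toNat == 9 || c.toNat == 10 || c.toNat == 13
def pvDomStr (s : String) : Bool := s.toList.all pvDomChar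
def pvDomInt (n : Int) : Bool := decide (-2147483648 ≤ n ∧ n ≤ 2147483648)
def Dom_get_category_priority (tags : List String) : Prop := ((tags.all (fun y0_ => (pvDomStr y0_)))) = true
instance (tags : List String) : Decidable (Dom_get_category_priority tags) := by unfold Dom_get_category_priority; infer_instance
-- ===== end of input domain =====

-- B replaces A's running max over the tags by a single descending scan of the fixed
-- priority table against a membership set of the tags (alternative decomposition).

-- ===== PORT A =====
def priorityMap : PySem.Dict String Int :=
  ((((((((((PySem.Dict.empty.insert "security" 10).insert "job_offer" 9).insert
      "financial" 8).insert "receipt" 7).insert "work" 6).insert "travel" 5).insert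
      "personal" 4).insert "newsletter" 2).insert "promotional" 1).insert "general" 3)

def get_category_priority (tags : List String) : Int :=
  tags.foldl
    (fun max_priority tag =>
      if priorityMap.contains tag then max (max_priority) (priorityMap.getD tag 0)
      else max_priority)
    0

-- ===== PORT B =====
def priorityDesc : List (String × Int) :=
  [("security", 10), ("job_offer", 9), ("financial", 8), ("receipt", 7), ("work", 6),
   ("travel", 5), ("personal", 4), ("general", 3), ("newsletter", 2), ("promotional", 1)]

def altScan : List (String × Int) → PySem.Set String → Int
  | [], _ => 0
  | (name, score) :: rest, present =>
      if PySem.Set.contains present name then score else altScan rest present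

def get_category_priority_alt (tags : List String) : Int :=
  altScan priorityDesc (PySem.Set.ofList tags)

-- ===== PRECONDITION & SPEC =====
def Spec_get_category_priority (tags : List String) (out : Int) : Prop := out = get_category_priority_alt tags
instance (tags : List String) (out : Int) : Decidable (Spec_get_category_priority tags out) := by unfold Spec_get_category_priority; infer_instance

-- ===== CLAIM (what is proved, stated in full; the proofs are below) =====
def Claim_equal_get_category_priority : Prop := ∀ (tags : List String), Dom_get_category_priority tags → Spec_get_category_priority tags (get_category_priority tags)

-- ===== LEMMAS AND PROOFS =====

-- priority of a tag as the descending table sees it (proof-only helper)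
def prioIn : List (String × Int) → String → Int
  | [], _ => 0
  | (name, score) :: rest, t => if t = name then score else prioIn rest t

-- B's scan phrased over the raw tag list (proof-only helper)
def altScanL : List (String × Int) → List String → Int
  | [], _ => 0
  | (name, score) :: rest, tags =>
      if tags.contains name then score else altScanL rest tags

lemma altScan_ofList (cats : List (String × Int)) (tags : List String) :
    altScan cats (PySem.Set.ofList tags) = altScanL cats tags := by
  induction cats with
  | nil => rfl
  | cons e rest ih =>
    obtain ⟨name, score⟩ := e
    simp only [altScan, altScanL, ih, PySem.Set.contains_eq_listContains]
    by_cases h : name ∈ tags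
    · simp [h, PySem.Set.mem_ofList]
    · simp [h, PySem.Set.mem_ofList]

lemma prioIn_le (cats : List (String × Int)) (t : String) (P : Int)
    (h0 : 0 ≤ P) (hP : ∀ e ∈ cats, e.2 ≤ P) : prioIn cats t ≤ P := by
  induction cats with
  | nil => simpa [prioIn]
  | cons e rest ih =>
    obtain ⟨name, score⟩ := e
    simp only [prioIn]
    split_ifs
    · exact hP (name, score) (by simp)
    · exact ih (fun e he => hP e (by simp [he]))

lemma altScanL_le (cats : List (String × Int)) (tags : List String) (P : Int)
    (h0 : 0 ≤ P) (hP : ∀ e ∈ cats, e.2 ≤ P) : altScanL cats tags ≤ P := by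
  induction cats with
  | nil => simpa [altScanL]
  | cons e rest ih =>
    obtain ⟨name, score⟩ := e
    simp only [altScanL]
    split_ifs
    · exact hP (name, score) (by simp)
    · exact ih (fun e he => hP e (by simp [he]))

lemma altScanL_nonneg (cats : List (String × Int)) (tags : List String)
    (hn : ∀ e ∈ cats, 0 ≤ e.2) : 0 ≤ altScanL cats tags := by
  induction cats with
  | nil => simp [altScanL]
  | cons e rest ih =>
    obtain ⟨name, score⟩ := e
    simp only [altScanL]
    split_ifs
    · exact hn (name, score) (by simp)
    · exact ih (fun e he => hn e (by simp [he]))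

lemma altScanL_cons (cats : List (String × Int)) (t : String) (ts : List String)
    (hd : cats.Pairwise (fun a b => b.2 ≤ a.2)) (hn : ∀ e ∈ cats, 0 ≤ e.2) :
    altScanL cats (t :: ts) = max (prioIn cats t) (altScanL cats ts) := by
  induction cats with
  | nil => simp [altScanL, prioIn]
  | cons e rest ih =>
    obtain ⟨name, score⟩ := e
    have hs : 0 ≤ score := hn (name, score) (by simp)
    have hrest : ∀ e ∈ rest, e.2 ≤ score := by
      intro e he; exact (List.pairwise_cons.mp hd).1 e he
    have hrn : ∀ e ∈ rest, 0 ≤ e.2 := fun e he => hn e (by simp [he])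
    by_cases h1 : t = name
    · subst h1
      have hcont : (t :: ts).contains t = true := by simp
      have hr : altScanL rest ts ≤ score := altScanL_le rest ts score hs hrest
      simp only [altScanL, prioIn, hcont, if_true]
      split_ifs <;> omega
    · have hbeq : (name == t) = false := by
        simp [Ne.symm h1]
      have hcont : (t :: ts).contains name = ts.contains name := by
        simp only [List.contains_cons, hbeq, Bool.false_or]
      simp only [altScanL, prioIn, hcont, if_neg h1]
      by_cases h2 : ts.contains name = true
      · have hp : prioIn rest t ≤ score := prioIn_le rest t score hs hrest
        rw [if_pos h2, if_pos h2]
        omega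
      · rw [if_neg h2, if_neg h2]
        exact ih (List.pairwise_cons.mp hd).2 hrn

-- A's guarded lookup agrees with the descending table's priority function
lemma lookup_eq (t : String) :
    (if priorityMap.contains t then priorityMap.getD t 0 else 0) = prioIn priorityDesc t := by
  simp only [priorityMap, priorityDesc, prioIn,
    PySem.Dict.contains_insert, PySem.Dict.contains_empty,
    PySem.Dict.getD_insert, PySem.Dict.getD_empty]
  by_cases h1 : t = "security" <;> by_cases h2 : t = "job_offer" <;>
    by_cases h3 : t = "financial" <;> by_cases h4 : t = "receipt" <;>
    by_cases h5 : t = "work" <;> by_cases h6 : t = "travel" <;>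
    by_cases h7 : t = "personal" <;> by_cases h8 : t = "newsletter" <;>
    by_cases h9 : t = "promotional" <;> by_cases h10 : t = "general" <;>
    simp_all

lemma foldl_eq_scan (ts : List String) (a : Int) (ha : 0 ≤ a) :
    ts.foldl
      (fun max_priority tag =>
        if priorityMap.contains tag then max (max_priority) (priorityMap.getD tag 0)
        else max_priority)
      a = max a (altScanL priorityDesc ts) := by
  induction ts generalizing a with
  | nil =>
    have : altScanL priorityDesc [] = 0 := by decide
    simp [this, max_eq_left ha]
  | cons t ts ih =>
    have hstep : (if priorityMap.contains t then max a (priorityMap.getD t 0) else a)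
        = max a (prioIn priorityDesc t) := by
      rw [← lookup_eq t]
      by_cases h : priorityMap.contains t
      · simp [h]
      · simp [h, max_eq_left ha]
    have hnn : (0:Int) ≤ max a (prioIn priorityDesc t) := le_max_of_le_left ha
    have hcons : altScanL priorityDesc (t :: ts)
        = max (prioIn priorityDesc t) (altScanL priorityDesc ts) := by
      apply altScanL_cons
      · decide
      · decide
    simp only [List.foldl_cons, hstep, hcons]
    rw [ih _ hnn, max_assoc]

-- ===== VERDICT (by name: the statement is the Claim_ definition above) =====
theorem get_category_priority_spec : Claim_equal_get_category_priority := by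
  intro tags _
  unfold Spec_get_category_priority get_category_priority get_category_priority_alt
  rw [altScan_ofList, foldl_eq_scan tags 0 le_rfl]
  exact max_eq_right (altScanL_nonneg priorityDesc tags (by decide))
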